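-- pv_equiv track=rewrite | github.com/Rimjhimrani/Chakan_binlabel | chakanbin.py | find_bus_model_column
-- ===== SOURCE A (Python) =====
-- def find_bus_model_column(df_columns):
--     """
--     Enhanced function to find the bus model column with better detection
--     """
--     cols = [str(col).upper() for col in df_columns]
--
--     # Priority order for bus model column detection
--     patterns = [
--         # Exact matches (highest priority)
--         lambda col: col == 'BUS_MODEL',
--         lambda col: col == 'BUSMODEL',
--         lambda col: col == 'BUS MODEL',
--         lambda col: col == 'MODEL',
--         lambda col: col == 'BUS_TYPE',
--         lambda col: col == 'BUSTYPE',
--         lambda col: col == 'BUS TYPE',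
--         lambda col: col == 'VEHICLE_TYPE',
--         lambda col: col == 'VEHICLETYPE',
--         lambda col: col == 'VEHICLE TYPE',
--         # Partial matches (lower priority)
--         lambda col: 'BUS' in col and 'MODEL' in col,
--         lambda col: 'BUS' in col and 'TYPE' in col,
--         lambda col: 'VEHICLE' in col and 'MODEL' in col,
--         lambda col: 'VEHICLE' in col and 'TYPE' in col,
--         lambda col: 'MODEL' in col,
--         lambda col: 'BUS' in col,
--         lambda col: 'VEHICLE' in col,
--     ]
--
--     for pattern in patterns:
--         for i, col in enumerate(cols):
--             if pattern(col):
--                 return df_columns[i]  # Return original column name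
--
--     return None
-- ===== SOURCE B (Python) =====
-- _PATTERNS = [
--     lambda col: col == 'BUS_MODEL',
--     lambda col: col == 'BUSMODEL',
--     lambda col: col == 'BUS MODEL',
--     lambda col: col == 'MODEL',
--     lambda col: col == 'BUS_TYPE',
--     lambda col: col == 'BUSTYPE',
--     lambda col: col == 'BUS TYPE',
--     lambda col: col == 'VEHICLE_TYPE',
--     lambda col: col == 'VEHICLETYPE',
--     lambda col: col == 'VEHICLE TYPE',
--     lambda col: 'BUS' in col and 'MODEL' in col,
--     lambda col: 'BUS' in col and 'TYPE' in col,
--     lambda col: 'VEHICLE' in col and 'MODEL' in col,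
--     lambda col: 'VEHICLE' in col and 'TYPE' in col,
--     lambda col: 'MODEL' in col,
--     lambda col: 'BUS' in col,
--     lambda col: 'VEHICLE' in col,
-- ]
--
--
-- def _rank(col):
--     """Index of the first pattern the (uppercased) column matches, len(_PATTERNS) if none."""
--     for i, pattern in enumerate(_PATTERNS):
--         if pattern(col):
--             return i
--     return len(_PATTERNS)
--
--
-- def find_bus_model_column(df_columns):
--     """One pass: keep the earliest column with the best (lowest) pattern rank."""
--     best_rank = len(_PATTERNS)
--     best = None
--     for col in df_columns:
--         r = _rank(str(col).upper())
--         if r < best_rank: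
--             best_rank = r
--             best = col
--     return best
-- ===== Notes on version B (the rewrite author's own statement) =====
-- stated objective: simpler
-- what changed: Replaces the pattern-outer/column-inner nested search (restarting the column scan for each of the 17 patterns) by a single pass over the columns that computes each column's first-matching-pattern rank and keeps the earliest column with the lowest rank.
import Mathlib
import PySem

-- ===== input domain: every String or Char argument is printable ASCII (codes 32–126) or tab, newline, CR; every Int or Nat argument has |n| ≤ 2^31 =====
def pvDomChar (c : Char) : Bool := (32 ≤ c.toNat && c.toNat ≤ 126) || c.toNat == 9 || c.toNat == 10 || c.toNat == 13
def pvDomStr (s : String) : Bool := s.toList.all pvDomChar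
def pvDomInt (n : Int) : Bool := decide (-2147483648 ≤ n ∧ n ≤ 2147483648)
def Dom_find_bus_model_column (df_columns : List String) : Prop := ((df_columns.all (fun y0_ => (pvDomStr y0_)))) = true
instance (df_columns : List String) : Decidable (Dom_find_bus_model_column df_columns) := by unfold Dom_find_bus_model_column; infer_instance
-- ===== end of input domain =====

-- B replaces A's pattern-outer/column-inner nested search by one pass over the columns
-- keeping the column with the lowest pattern rank (objective: simpler, same result).

-- Shared constant: the priority-ordered pattern list both Pythons carry verbatim.
def busPatterns : List (String → Bool) := [
  fun col => col == "BUS_MODEL",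
  fun col => col == "BUSMODEL",
  fun col => col == "BUS MODEL",
  fun col => col == "MODEL",
  fun col => col == "BUS_TYPE",
  fun col => col == "BUSTYPE",
  fun col => col == "BUS TYPE",
  fun col => col == "VEHICLE_TYPE",
  fun col => col == "VEHICLETYPE",
  fun col => col == "VEHICLE TYPE",
  fun col => PySem.Str.isIn "BUS" col && PySem.Str.isIn "MODEL" col,
  fun col => PySem.Str.isIn "BUS" col && PySem.Str.isIn "TYPE" col,
  fun col => PySem.Str.isIn "VEHICLE" col && PySem.Str.isIn "MODEL" col,
  fun col => PySem.Str.isIn "VEHICLE" col && PySem.Str.isIn "TYPE" col,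
  fun col => PySem.Str.isIn "MODEL" col,
  fun col => PySem.Str.isIn "BUS" col,
  fun col => PySem.Str.isIn "VEHICLE" col]

-- ===== PORT A =====
-- inner loop: 'for i, col in enumerate(cols): if pattern(col): return df_columns[i]'
-- (the parallel lists df_columns/cols are walked as their zip, the same pairing by index)
def scanColsA (p : String → Bool) : List (String × String) → Option String
  | [] => none
  | (o, c) :: rest => if p c then some o else scanColsA p rest

-- outer loop: 'for pattern in patterns: …' falling through to the next pattern
def outerA : List (String → Bool) → List (String × String) → Option String
  | [], _ => none
  | p :: ps, pairs =>
      match scanColsA p pairs with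
      | some o => some o
      | none => outerA ps pairs

def find_bus_model_column (df_columns : List String) : Option String :=
  let cols := df_columns.map PySem.Str.upper
  outerA busPatterns (df_columns.zip cols)

-- ===== PORT B =====
-- '_rank': index of the first matching pattern, len(patterns) if none
def rankAux : List (String → Bool) → String → Nat
  | [], _ => 0
  | p :: ps, c => if p c then 0 else rankAux ps c + 1

-- the single pass keeping (best_rank, best)
def bestGo : List String → Nat → Option String → Option String
  | [], _, best => best
  | col :: rest, bestRank, best =>
      let r := rankAux busPatterns (PySem.Str.upper col)
      if r < bestRank then bestGo rest r (some col) else bestGo rest bestRank best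

def find_bus_model_column_alt (df_columns : List String) : Option String :=
  bestGo df_columns busPatterns.length none

-- ===== PRECONDITION & SPEC =====
def Spec_find_bus_model_column (df_columns : List String) (out : Option String) : Prop := out = find_bus_model_column_alt df_columns
instance (df_columns : List String) (out : Option String) : Decidable (Spec_find_bus_model_column df_columns out) := by unfold Spec_find_bus_model_column; infer_instance

-- ===== CLAIM (what is proved, stated in full; the proofs are below) =====
def Claim_equal_find_bus_model_column : Prop := ∀ (df_columns : List String), Dom_find_bus_model_column df_columns → Spec_find_bus_model_column df_columns (find_bus_model_column df_columns)

-- ===== LEMMAS AND PROOFS =====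

-- generic "keep the first element below the running threshold" pass
def pickF (f : String → Nat) : List String → Nat → Option String → Option String
  | [], _, o => o
  | x :: xs, b, o => if f x < b then pickF f xs (f x) (some x) else pickF f xs b o

theorem bestGo_eq_pickF (xs : List String) (b : Nat) (o : Option String) :
    bestGo xs b o = pickF (fun x => rankAux busPatterns (PySem.Str.upper x)) xs b o := by
  induction xs generalizing b o with
  | nil => rfl
  | cons x xs ih => simp only [bestGo, pickF]; split <;> exact ih _ _

theorem pickF_congr (f g : String → Nat) (xs : List String) (b : Nat) (o : Option String)
    (h : ∀ x ∈ xs, f x = g x) : pickF f xs b o = pickF g xs b o := by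
  induction xs generalizing b o with
  | nil => rfl
  | cons x xs ih =>
      simp only [pickF, h x (by simp)]
      split <;> exact ih _ _ (fun y hy => h y (by simp [hy]))

theorem pickF_zero (f : String → Nat) (xs : List String) (o : Option String) :
    pickF f xs 0 o = o := by
  induction xs with
  | nil => rfl
  | cons x xs ih => simp [pickF, ih]

theorem pickF_shift (f : String → Nat) (xs : List String) (b : Nat) (o : Option String) :
    pickF (fun x => f x + 1) xs (b + 1) o = pickF f xs b o := by
  induction xs generalizing b o with
  | nil => rfl
  | cons x xs ih =>
      simp only [pickF, Nat.add_lt_add_iff_right]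
      split <;> exact ih _ _

theorem pickF_found (f : String → Nat) (xs : List String) (b : Nat) (o : Option String)
    (hb : 0 < b) (h : ∃ y ∈ xs, f y = 0) :
    pickF f xs b o = xs.find? (fun x => f x == 0) := by
  induction xs generalizing b o with
  | nil => simp at h
  | cons x xs ih =>
      by_cases hx : f x = 0
      · simp [pickF, hx, hb, pickF_zero, List.find?]
      · have h' : ∃ y ∈ xs, f y = 0 := by
          obtain ⟨y, hy, hy0⟩ := h
          rcases List.mem_cons.mp hy with rfl | hy' <;> [exact absurd hy0 hx; exact ⟨y, hy', hy0⟩]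
        have hxb : (f x == 0) = false := by simp [hx]
        simp only [pickF, List.find?, hxb]
        split
        · exact ih _ _ (Nat.pos_of_ne_zero hx) h'
        · exact ih _ _ hb h'

theorem scanColsA_eq_find? (p : String → Bool) (xs : List String) :
    scanColsA p (xs.zip (xs.map PySem.Str.upper)) = xs.find? (fun x => p (PySem.Str.upper x)) := by
  induction xs with
  | nil => rfl
  | cons x xs ih =>
      simp only [List.map_cons, List.zip_cons_cons, scanColsA, List.find?]
      split <;> simp_all

-- main generic lemma: the nested search over ps equals the one-pass rank minimisation
theorem outerA_eq_pickF (ps : List (String → Bool)) (xs : List String) :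
    outerA ps (xs.zip (xs.map PySem.Str.upper)) =
      pickF (fun x => rankAux ps (PySem.Str.upper x)) xs ps.length none := by
  induction ps with
  | nil => simp [outerA, rankAux, pickF_zero]
  | cons p ps ih =>
      by_cases h : ∃ y ∈ xs, p (PySem.Str.upper y) = true
      · obtain ⟨o, ho⟩ : ∃ o, xs.find? (fun x => p (PySem.Str.upper x)) = some o := by
          rw [← Option.isSome_iff_exists, List.find?_isSome]; exact h
        have hrank : (fun x => rankAux (p :: ps) (PySem.Str.upper x) == 0)
            = fun x => p (PySem.Str.upper x) := by
          funext x
          by_cases hp : p (PySem.Str.upper x) = true <;> simp [rankAux, hp]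
        rw [outerA, scanColsA_eq_find?, ho]
        show some o = _
        rw [List.length_cons,
          pickF_found _ _ _ _ (Nat.succ_pos ps.length) (by
            obtain ⟨y, hy, hyp⟩ := h
            exact ⟨y, hy, by simp [rankAux, hyp]⟩),
          hrank, ho]
      · have h' : ∀ y ∈ xs, ¬ p (PySem.Str.upper y) = true :=
          fun y hy hp => h ⟨y, hy, hp⟩
        have hnone : xs.find? (fun x => p (PySem.Str.upper x)) = none :=
          List.find?_eq_none.mpr h'
        rw [outerA, scanColsA_eq_find?, hnone]
        show outerA ps (xs.zip (xs.map PySem.Str.upper)) = _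
        rw [ih, List.length_cons,
          pickF_congr (fun x => rankAux (p :: ps) (PySem.Str.upper x))
            (fun x => rankAux ps (PySem.Str.upper x) + 1) xs (ps.length + 1) none
            (fun x hx => by simp [rankAux, h' x hx]),
          pickF_shift]

-- ===== VERDICT (by name: the statement is the Claim_ definition above) =====
theorem find_bus_model_column_spec : Claim_equal_find_bus_model_column := by
  intro df _
  show find_bus_model_column df = find_bus_model_column_alt df
  rw [find_bus_model_column, find_bus_model_column_alt, bestGo_eq_pickF]
  exact outerA_eq_pickF busPatterns df
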